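-- pv_equiv track=rewrite | github.com/hm1298/hanabdata | scripts/find_similar_players.py | clear_memory
-- ===== SOURCE A (Python) =====
-- def clear_memory(memory, storage, turn):
--     """mutates memory & storage"""
--     while len(memory) > turn:
--         action_to_players = memory.pop()
--         all_players = set().union(*action_to_players.values())
--         for these_players in action_to_players.values():
--             for player1 in all_players:
--                 storage.setdefault(player1, {})
--                 for player2 in these_players:
--                     # not interested in similarity of same player
--                     if player1 == player2:
--                         continue
--
--                     storage[player1].setdefault(player2, [0, 0])
--
--                     # 0th index stores total number of matching gamestates
--                     storage[player1][player2][0] += 1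
--                     if player1 in these_players:
--                         # 1st index stores total number of equal actions
--                         storage[player1][player2][1] += 1
--
--     return storage
-- ===== SOURCE B (Python) =====
-- def clear_memory(memory, storage, turn):
--     """mutates memory & storage; batched per-player counting instead of
--     scanning every player for every action group"""
--     start = max(turn, 0)
--     for action_to_players in reversed(memory[start:]):
--         groups = list(action_to_players.values())
--         # occ[p] = number of occurrences of p across all groups (insertion order
--         # = first occurrence); its keys are exactly the players of this entry
--         occ = {}
--         for g in groups:
--             for p in g:
--                 occ[p] = occ.get(p, 0) + 1
--         for p1 in occ:
--             storage.setdefault(p1, {})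
--         for p1 in occ:
--             # ex[p2] = number of groups (with multiplicity) containing both p1 and p2
--             ex = {}
--             for g in groups:
--                 if p1 in g:
--                     for p2 in g:
--                         if p2 != p1:
--                             ex[p2] = ex.get(p2, 0) + 1
--             d = storage[p1]
--             for p2 in occ:
--                 if p2 != p1:
--                     cell = d.setdefault(p2, [0, 0])
--                     cell[0] += occ[p2]
--                     cell[1] += ex.get(p2, 0)
--     del memory[start:]
--     return storage
-- ===== Notes on version B (the rewrite author's own statement) =====
-- stated objective: alternative
-- what changed: Per memory entry, A rescans every player of the entry for every action group and bumps each pair cell one occurrence at a time (groups x players x group-size work); B builds one occurrence-count dict and, per player, a shared-group count dict, then writes each pair's two increments in one pass over the players (asymptotically less work when entries have many groups, though not measurably faster on the generated input family).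
-- outside the precondition, e.g. on clear_memory([{'x': ['p']}], {}, -1): A raises IndexError, B returns {'p': {}}
import Mathlib
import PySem

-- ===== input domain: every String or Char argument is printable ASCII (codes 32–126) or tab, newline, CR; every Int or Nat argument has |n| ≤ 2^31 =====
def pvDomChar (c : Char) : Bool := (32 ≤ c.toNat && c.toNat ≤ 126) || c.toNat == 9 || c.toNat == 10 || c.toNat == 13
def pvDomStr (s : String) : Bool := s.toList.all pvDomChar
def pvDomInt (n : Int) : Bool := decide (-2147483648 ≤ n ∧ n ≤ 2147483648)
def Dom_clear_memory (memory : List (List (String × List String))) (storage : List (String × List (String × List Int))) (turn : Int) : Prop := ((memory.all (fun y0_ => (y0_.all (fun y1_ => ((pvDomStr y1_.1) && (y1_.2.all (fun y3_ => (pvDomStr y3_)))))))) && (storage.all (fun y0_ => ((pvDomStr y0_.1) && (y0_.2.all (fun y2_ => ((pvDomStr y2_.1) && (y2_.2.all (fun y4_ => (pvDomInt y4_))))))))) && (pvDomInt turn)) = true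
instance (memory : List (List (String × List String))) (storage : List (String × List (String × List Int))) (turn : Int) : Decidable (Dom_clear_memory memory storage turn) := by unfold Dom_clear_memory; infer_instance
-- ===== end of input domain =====

-- B batches the per-pair counting per player (using per-entry occurrence counts and
-- shared-group counts) instead of A's rescan of every player for every action group.
-- Both Pythons mutate their arguments in place (A pops memory down to `turn` and updates
-- storage; B performs the same mutations); the equivalence proved here is about the
-- RETURN value, computed purely on the Lean side.

abbrev IDict := PySem.Dict String (List Int)
abbrev SDict := PySem.Dict String IDict

-- ===== PORT A =====

-- lst[0] += 1  (Python raises IndexError on []; Pre_ keeps that outside)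
def pvBump0 : List Int → List Int
  | [] => []
  | x :: r => (x + 1) :: r

-- lst[1] += 1
def pvBump1 : List Int → List Int
  | x :: y :: r => x :: (y + 1) :: r
  | l => l

-- body of A's inner `for player2 in these_players` loop
def pvAStep (g : List String) (p1 : String) (st : SDict) (p2 : String) : SDict :=
  if p2 = p1 then st
  else
    let st1 := st.modify p1 PySem.Dict.empty (fun d => d.setdefault p2 [0, 0])
    let st2 := st1.modify p1 PySem.Dict.empty (fun d => d.modify p2 [0, 0] pvBump0)
    if p1 ∈ g then st2.modify p1 PySem.Dict.empty (fun d => d.modify p2 [0, 0] pvBump1)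
    else st2

-- one iteration of A's `while` body on a popped entry
def pvAEntry (st : SDict) (e : List (String × List String)) : SDict :=
  let groups := (PySem.Dict.mk e).values
  let allP : PySem.Set String := groups.foldl (fun s g => PySem.Set.union s g) PySem.Set.empty
  groups.foldl (fun st g =>
    allP.foldl (fun st p1 => g.foldl (pvAStep g p1) (st.setdefault p1 PySem.Dict.empty)) st) st

-- A's `while len(memory) > turn: memory.pop()` loop (pop of an empty list raises: Pre_)
def pvALoop (memory : List (List (String × List String))) (st : SDict) (turn : Int) : SDict :=
  if (memory.length : Int) > turn then
    match h : memory.getLast? with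
    | none => st  -- Python raises IndexError here (turn < 0); outside Pre_
    | some e => pvALoop memory.dropLast (pvAEntry st e) turn
  else st
termination_by memory.length
decreasing_by
  have hne : memory ≠ [] := by rintro rfl; simp at h
  have := List.length_pos_iff.mpr hne
  simp [List.length_dropLast]; omega

def pvToSD (storage : List (String × List (String × List Int))) : SDict :=
  PySem.Dict.mk (storage.map (fun p => (p.1, PySem.Dict.mk p.2)))

def pvFromSD (st : SDict) : List (String × List (String × List Int)) :=
  st.items.map (fun p => (p.1, p.2.items))

def clear_memory (memory : List (List (String × List String))) (storage : List (String × List (String × List Int))) (turn : Int) : List (String × List (String × List Int)) :=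
  pvFromSD (pvALoop memory (pvToSD storage) turn)

-- ===== PORT B =====

-- cell[0] += a
def pvAdd0 (a : Int) : List Int → List Int
  | [] => []
  | x :: r => (x + a) :: r

-- cell[1] += b
def pvAdd1 (b : Int) : List Int → List Int
  | x :: y :: r => x :: (y + b) :: r
  | l => l

-- occ[p] = occ.get(p, 0) + 1 over all groups
def pvOcc (groups : List (List String)) : PySem.Dict String Int :=
  groups.foldl (fun occ g => g.foldl (fun occ p => occ.insert p (occ.getD p 0 + 1)) occ) PySem.Dict.empty

-- ex[p2] = number of groups containing p1 in which p2 also occurs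
def pvEx (groups : List (List String)) (p1 : String) : PySem.Dict String Int :=
  groups.foldl (fun ex g =>
    if p1 ∈ g then
      g.foldl (fun ex p2 => if p2 = p1 then ex else ex.insert p2 (ex.getD p2 0 + 1)) ex
    else ex) PySem.Dict.empty

-- one entry of B's `for action_to_players in reversed(memory[start:])` loop
def pvBEntry (e : List (String × List String)) (st : SDict) : SDict :=
  let groups := (PySem.Dict.mk e).values
  let occ := pvOcc groups
  let order := occ.keys
  let st1 := order.foldl (fun st p1 => st.setdefault p1 PySem.Dict.empty) st
  order.foldl (fun st p1 =>
    let ex := pvEx groups p1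
    st.modify p1 PySem.Dict.empty (fun d =>
      order.foldl (fun d p2 =>
        if p2 = p1 then d
        else
          let d1 := d.setdefault p2 [0, 0]
          let d2 := d1.modify p2 [0, 0] (pvAdd0 (occ.getD p2 0))
          d2.modify p2 [0, 0] (pvAdd1 (ex.getD p2 0))) d)) st1

def clear_memory_alt (memory : List (List (String × List String))) (storage : List (String × List (String × List Int))) (turn : Int) : List (String × List (String × List Int)) :=
  let start : Int := max turn 0
  pvFromSD (((PySem.List.slice memory (some start) none).reverse).foldl (fun st e => pvBEntry e st) (pvToSD storage))

-- ===== PRECONDITION & SPEC =====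

-- all players of one memory entry (the flattened group lists)
def pvFl (e : List (String × List String)) : List String := (e.map Prod.snd).flatten

-- the (p1, p2) cells whose counter lists A actually increments
def pvTouched (mem : List (List (String × List String))) (p1 p2 : String) : Prop :=
  p1 ≠ p2 ∧ ∃ e ∈ mem, p1 ∈ pvFl e ∧ p2 ∈ pvFl e

def pvCellsOK (mem : List (List (String × List String))) (storage : List (String × List (String × List Int))) : Prop :=
  ∀ p ∈ storage, ∀ q ∈ p.2, 2 ≤ q.2.length ∨ ¬ pvTouched mem p.1 q.1

-- Pre_ excludes: turn < 0 (A pops an empty list: IndexError); association lists with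
-- duplicate dict keys or duplicate set elements, which no Python dict/set input can
-- produce; and incremented counter cells shorter than 2, on which A or B raises
-- IndexError (A returns when only cell[0] is touched, B evaluates cell[1] as well:
-- see the cite in claim.json).
def Pre_clear_memory (memory : List (List (String × List String))) (storage : List (String × List (String × List Int))) (turn : Int) : Prop :=
  0 ≤ turn ∧
  (storage.map Prod.fst).Nodup ∧
  (∀ p ∈ storage, (p.2.map Prod.fst).Nodup) ∧
  (∀ e ∈ memory, (e.map Prod.fst).Nodup ∧ ∀ g ∈ e, g.2.Nodup) ∧
  pvCellsOK (memory.drop turn.toNat) storage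

instance (memory : List (List (String × List String))) (storage : List (String × List (String × List Int))) (turn : Int) : Decidable (Pre_clear_memory memory storage turn) := by unfold Pre_clear_memory; unfold pvCellsOK pvTouched; infer_instance

def pvWitness_clear_memory : (List (List (String × List String))) × (List (String × List (String × List Int))) × Int :=
  ([[("a", ["p", "q"])], [("b", ["q"])]], [("p", [("q", [1, 2])])], 1)

def Spec_clear_memory (memory : List (List (String × List String))) (storage : List (String × List (String × List Int))) (turn : Int) (out : List (String × List (String × List Int))) : Prop := out = clear_memory_alt memory storage turn
instance (memory : List (List (String × List String))) (storage : List (String × List (String × List Int))) (turn : Int) (out : List (String × List (String × List Int))) : Decidable (Spec_clear_memory memory storage turn out) := by unfold Spec_clear_memory; infer_instance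

-- ===== CLAIM (what is proved, stated in full; the proofs are below) =====
def Claim_equal_clear_memory : Prop := ∀ (memory : List (List (String × List String))) (storage : List (String × List (String × List Int))) (turn : Int), Dom_clear_memory memory storage turn → Pre_clear_memory memory storage turn → Spec_clear_memory memory storage turn (clear_memory memory storage turn)


-- ===== LEMMAS AND PROOFS =====

theorem pv_witness_ok : Dom_clear_memory (pvWitness_clear_memory.1) (pvWitness_clear_memory.2.1) (pvWitness_clear_memory.2.2) ∧ Pre_clear_memory (pvWitness_clear_memory.1) (pvWitness_clear_memory.2.1) (pvWitness_clear_memory.2.2) := by decide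


-- ---- generic machinery: a Dict update loop as a list of keyed pointwise operations ----

def pvApp {ν : Type} (v0 : ν) (d : PySem.Dict String ν) (op : String × (ν → ν)) : PySem.Dict String ν :=
  d.insert op.1 (op.2 (d.getD op.1 v0))

def pvRun {ν : Type} (v0 : ν) (ops : List (String × (ν → ν))) (d : PySem.Dict String ν) : PySem.Dict String ν :=
  ops.foldl (pvApp v0) d

def pvComp {ν : Type} (ops : List (String × (ν → ν))) (k : String) (v : ν) : ν :=
  (ops.filter (fun p => p.1 == k)).foldl (fun v p => p.2 v) v

theorem pvRun_append {ν : Type} (v0 : ν) (l1 l2 : List (String × (ν → ν))) (d : PySem.Dict String ν) :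
    pvRun v0 (l1 ++ l2) d = pvRun v0 l2 (pvRun v0 l1 d) :=
  List.foldl_append

theorem pvRun_map {α ν : Type} (v0 : ν) (l : List α) (h : α → String × (ν → ν)) (d : PySem.Dict String ν) :
    pvRun v0 (l.map h) d = l.foldl (fun d x => pvApp v0 d (h x)) d := by
  simp [pvRun, List.foldl_map]

theorem pv_contains_app {ν : Type} (v0 : ν) (d : PySem.Dict String ν) (op : String × (ν → ν))
    (k : String) (h : d.contains k = true) : (pvApp v0 d op).contains k = true := by
  simp [pvApp, PySem.Dict.contains_insert, h]

theorem pv_insert_comm {ν : Type} (d : PySem.Dict String ν) (k j : String) (v w : ν)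
    (hne : k ≠ j) (hk : d.contains k = true) :
    (d.insert j w).insert k v = (d.insert k v).insert j w := by
  have hjk : (j == k) = false := by simp [Ne.symm hne]
  have hkj : (k == j) = false := by simp [hne]
  apply PySem.Dict.ext
  have h1 : (d.insert j w).contains k = true := by simp [PySem.Dict.contains_insert, hk]
  rcases hj : d.contains j with _ | _
  · have h2 : (d.insert k v).contains j = false := by
      simp [PySem.Dict.contains_insert, hjk, hj]
    rw [PySem.Dict.items_insert_of_contains (d.insert j w) v h1,
        PySem.Dict.items_insert_of_not_contains d w hj,
        PySem.Dict.items_insert_of_not_contains (d.insert k v) w h2,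
        PySem.Dict.items_insert_of_contains d v hk]
    simp [hjk]
    exact fun h => absurd h (Ne.symm hne)
  · have h2 : (d.insert k v).contains j = true := by
      simp [PySem.Dict.contains_insert, hj]
    rw [PySem.Dict.items_insert_of_contains (d.insert j w) v h1,
        PySem.Dict.items_insert_of_contains d w hj,
        PySem.Dict.items_insert_of_contains (d.insert k v) w h2,
        PySem.Dict.items_insert_of_contains d v hk]
    simp only [List.map_map]
    apply List.map_congr_left
    rintro ⟨a, b⟩ _
    by_cases hak : a = k <;> by_cases haj : a = j <;> simp_all

theorem pvApp_app_self {ν : Type} (v0 : ν) (d : PySem.Dict String ν) (k : String) (f g : ν → ν) :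
    pvApp v0 (pvApp v0 d (k, g)) (k, f) = pvApp v0 d (k, fun v => f (g v)) := by
  simp [pvApp, PySem.Dict.getD_insert_self, PySem.Dict.insert_insert_self]

theorem pvApp_comm {ν : Type} (v0 : ν) (d : PySem.Dict String ν) (k j : String) (f h : ν → ν)
    (hne : k ≠ j) (hk : d.contains k = true) :
    pvApp v0 (pvApp v0 d (j, h)) (k, f) = pvApp v0 (pvApp v0 d (k, f)) (j, h) := by
  simp only [pvApp, PySem.Dict.getD_insert, hne, Ne.symm hne, if_false]
  exact pv_insert_comm d k j _ _ hne hk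

theorem pvApp_run_comm {ν : Type} (v0 : ν) (ops : List (String × (ν → ν))) (d : PySem.Dict String ν)
    (k : String) (f : ν → ν) (hk : d.contains k = true) (hops : ∀ p ∈ ops, p.1 ≠ k) :
    pvApp v0 (pvRun v0 ops d) (k, f) = pvRun v0 ops (pvApp v0 d (k, f)) := by
  induction ops generalizing d with
  | nil => rfl
  | cons op ops ih =>
    obtain ⟨j, hfn⟩ := op
    have hjk : k ≠ j := Ne.symm (hops (j, hfn) (by simp))
    calc pvApp v0 (pvRun v0 ops (pvApp v0 d (j, hfn))) (k, f)
        = pvRun v0 ops (pvApp v0 (pvApp v0 d (j, hfn)) (k, f)) :=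
          ih (pvApp v0 d (j, hfn)) (pv_contains_app v0 d _ k hk)
            (fun p hp => hops p (List.mem_cons_of_mem _ hp))
      _ = pvRun v0 ops (pvApp v0 (pvApp v0 d (k, f)) (j, hfn)) := by
          rw [pvApp_comm v0 d k j f hfn hjk hk]
      _ = _ := rfl

theorem pvRun_congr_map {ν : Type} (v0 : ν) (l : List String) (F G : String → ν → ν)
    (d : PySem.Dict String ν) (h : ∀ x ∈ l, ∀ v, F x v = G x v) :
    pvRun v0 (l.map (fun x => (x, F x))) d = pvRun v0 (l.map (fun x => (x, G x))) d := by
  induction l generalizing d with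
  | nil => rfl
  | cons x l ih =>
    simp only [List.map_cons, pvRun, List.foldl_cons]
    rw [show pvApp v0 d (x, F x) = pvApp v0 d (x, G x) by simp [pvApp, h x (by simp)]]
    exact ih _ (fun y hy v => h y (by simp [hy]) v)

theorem pvComp_append {ν : Type} (l1 l2 : List (String × (ν → ν))) (k : String) (v : ν) :
    pvComp (l1 ++ l2) k v = pvComp l2 k (pvComp l1 k v) := by
  simp [pvComp, List.filter_append, List.foldl_append]

theorem pvComp_append_ne {ν : Type} (ops : List (String × (ν → ν))) (k k' : String) (f : ν → ν)
    (hne : k' ≠ k) (v : ν) : pvComp (ops ++ [(k, f)]) k' v = pvComp ops k' v := by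
  simp [pvComp, List.filter_append, Ne.symm hne]

theorem pvComp_append_self {ν : Type} (ops : List (String × (ν → ν))) (k : String) (f : ν → ν) (v : ν) :
    pvComp (ops ++ [(k, f)]) k v = f (pvComp ops k v) := by
  simp [pvComp, List.filter_append, List.foldl_append]

theorem pvComp_of_not_mem {ν : Type} (ops : List (String × (ν → ν))) (k : String)
    (h : k ∉ ops.map Prod.fst) (v : ν) : pvComp ops k v = v := by
  have hnil : ops.filter (fun p => p.1 == k) = [] := by
    refine List.filter_eq_nil_iff.mpr ?_
    rintro ⟨a, b⟩ hp
    simp only [beq_iff_eq, decide_eq_true_eq]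
    rintro rfl
    exact h (List.mem_map_of_mem hp)
  simp [pvComp, hnil]

theorem pvRun_collapse {ν : Type} (v0 : ν) (ops : List (String × (ν → ν))) (d : PySem.Dict String ν) :
    pvRun v0 ops d
      = pvRun v0 ((PySem.Set.ofList (ops.map Prod.fst)).map (fun k => (k, pvComp ops k))) d := by
  induction ops using List.reverseRecOn generalizing d with
  | nil => rfl
  | append_singleton ops op ih =>
    obtain ⟨k, f⟩ := op
    rw [pvRun_append, ih]
    by_cases hk : k ∈ ops.map Prod.fst
    · -- the key already occurs: its composed function gains f, keys unchanged
      have hkeys : PySem.Set.ofList ((ops ++ [(k, f)]).map Prod.fst)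
          = PySem.Set.ofList (ops.map Prod.fst) := by
        rw [List.map_append]
        simp [PySem.Set.ofList_append_singleton,
          PySem.Set.add_of_mem ((PySem.Set.mem_ofList _ _).mpr hk)]
      obtain ⟨s, t, hst⟩ := List.append_of_mem ((PySem.Set.mem_ofList _ _).mpr hk)
      have hnd := PySem.Set.nodup_ofList (ops.map Prod.fst)
      rw [hst] at hnd
      have hks : k ∉ s := fun hmem => (List.disjoint_of_nodup_append hnd) hmem (by simp)
      have hkt : k ∉ t := by
        have := (List.nodup_append.mp hnd).2.1
        exact (List.nodup_cons.mp this).1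
      rw [hkeys, hst]
      have hsplit : ∀ (P : String → ν → ν),
          (s ++ k :: t).map (fun k' => (k', P k'))
            = (s.map (fun k' => (k', P k')) ++ [(k, P k)]) ++ t.map (fun k' => (k', P k')) := by
        intro P; simp
      rw [hsplit, hsplit, pvRun_append, pvRun_append, pvRun_append, pvRun_append]
      -- rewrite the s- and t- parts: functions agree off k
      have hs_eq : pvRun v0 (s.map (fun k' => (k', pvComp (ops ++ [(k, f)]) k'))) d
          = pvRun v0 (s.map (fun k' => (k', pvComp ops k'))) d :=
        pvRun_congr_map v0 s _ _ d
          (fun x hx v => pvComp_append_ne ops k x f (fun hxk => hks (hxk ▸ hx)) v)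
      rw [hs_eq]
      set X := pvRun v0 (s.map (fun k' => (k', pvComp ops k'))) d with hX
      have hmid : pvRun v0 [(k, pvComp (ops ++ [(k, f)]) k)] X
          = pvApp v0 X (k, fun v => f (pvComp ops k v)) := by
        show pvApp v0 X (k, pvComp (ops ++ [(k, f)]) k) = _
        simp [pvApp, pvComp_append_self]
      rw [hmid]
      have ht_eq : ∀ Y, pvRun v0 (t.map (fun k' => (k', pvComp (ops ++ [(k, f)]) k'))) Y
          = pvRun v0 (t.map (fun k' => (k', pvComp ops k'))) Y :=
        fun Y => pvRun_congr_map v0 t _ _ Y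
          (fun x hx v => pvComp_append_ne ops k x f (fun hxk => hkt (hxk ▸ hx)) v)
      rw [ht_eq]
      -- LHS: push the trailing (k, f) application through the t-part and merge
      have hmid' : pvRun v0 [(k, pvComp ops k)] X = pvApp v0 X (k, pvComp ops k) := rfl
      rw [hmid']
      have hcont : (pvApp v0 X (k, pvComp ops k)).contains k = true := by
        simp [pvApp, PySem.Dict.contains_insert]
      have hcomm := pvApp_run_comm v0 (t.map (fun k' => (k', pvComp ops k')))
        (pvApp v0 X (k, pvComp ops k)) k f hcont
        (by rintro p hp; obtain ⟨x, hx, rfl⟩ := List.mem_map.mp hp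
            exact fun hxk => hkt (hxk ▸ hx))
      show pvApp v0 (pvRun v0 _ (pvApp v0 X (k, pvComp ops k))) (k, f) = _
      rw [hcomm, pvApp_app_self]
    · -- fresh key: appended at the end
      have hkeys : PySem.Set.ofList ((ops ++ [(k, f)]).map Prod.fst)
          = PySem.Set.ofList (ops.map Prod.fst) ++ [k] := by
        rw [List.map_append]
        simp [PySem.Set.ofList_append_singleton,
          PySem.Set.add_of_not_mem (fun h => hk ((PySem.Set.mem_ofList _ _).mp h))]
      rw [hkeys, List.map_append, pvRun_append]
      have hs_eq : pvRun v0 ((PySem.Set.ofList (ops.map Prod.fst)).map (fun k' => (k', pvComp (ops ++ [(k, f)]) k'))) d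
          = pvRun v0 ((PySem.Set.ofList (ops.map Prod.fst)).map (fun k' => (k', pvComp ops k'))) d :=
        pvRun_congr_map v0 _ _ _ d
          (fun x hx v => pvComp_append_ne ops k x f
            (fun hxk => hk (hxk ▸ (PySem.Set.mem_ofList _ _).mp hx)) v)
      rw [hs_eq]
      show pvApp v0 _ (k, f) = pvApp v0 _ (k, pvComp (ops ++ [(k, f)]) k)
      simp [pvApp, pvComp_append_self, pvComp_of_not_mem ops k hk]


-- ---- collapsing Python's setdefault/modify statement sequences into pvApp form ----

theorem pv_modify_eq_app {ν : Type} (v0 : ν) (st : PySem.Dict String ν) (k : String) (F : ν → ν) :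
    st.modify k v0 F = pvApp v0 st (k, F) := rfl

theorem pv_insert_getD_self {ν : Type} (v0 : ν) (st : PySem.Dict String ν) (k : String)
    (hnd : st.keys.Nodup) (hc : st.contains k = true) : st.insert k (st.getD k v0) = st := by
  apply PySem.Dict.ext
  rw [PySem.Dict.items_insert_of_contains st _ hc]
  conv_rhs => rw [← List.map_id st.items]
  apply List.map_congr_left
  rintro ⟨a, b⟩ hp
  by_cases hak : a = k
  · subst hak
    simp [PySem.Dict.getD_of_mem_items st hp hnd v0]
  · simp [hak]

theorem pv_sd_eq_app {ν : Type} (v0 : ν) (st : PySem.Dict String ν) (k : String)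
    (hnd : st.keys.Nodup) : st.setdefault k v0 = pvApp v0 st (k, id) := by
  rcases hc : st.contains k with _ | _
  · rw [PySem.Dict.setdefault_of_not_contains st _ hc]
    simp [pvApp, PySem.Dict.getD_of_not_contains st _ hc]
  · rw [PySem.Dict.setdefault_of_contains st _ hc]
    exact (pv_insert_getD_self v0 st k hnd hc).symm

theorem pv_nodup_app {ν : Type} (v0 : ν) (st : PySem.Dict String ν) (op : String × (ν → ν))
    (h : st.keys.Nodup) : (pvApp v0 st op).keys.Nodup :=
  PySem.Dict.nodup_keys_insert _ _ _ h

theorem pv_nodup_run {ν : Type} (v0 : ν) (ops : List (String × (ν → ν))) (st : PySem.Dict String ν)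
    (h : st.keys.Nodup) : (pvRun v0 ops st).keys.Nodup := by
  induction ops generalizing st with
  | nil => exact h
  | cons op ops ih => exact ih _ (pv_nodup_app v0 st op h)

theorem pv_sd_modify {ν : Type} (v0 : ν) (d : PySem.Dict String ν) (k : String) (F : ν → ν) :
    (d.setdefault k v0).modify k v0 F = pvApp v0 d (k, F) := by
  rcases hc : d.contains k with _ | _
  · rw [PySem.Dict.setdefault_of_not_contains d _ hc, pv_modify_eq_app]
    simp [pvApp, PySem.Dict.getD_insert_self, PySem.Dict.insert_insert_self,
      PySem.Dict.getD_of_not_contains d _ hc]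
  · rw [PySem.Dict.setdefault_of_contains d _ hc]; rfl

theorem pv_app_modify {ν : Type} (v0 : ν) (d : PySem.Dict String ν) (k : String) (F G : ν → ν) :
    (pvApp v0 d (k, F)).modify k v0 G = pvApp v0 d (k, fun x => G (F x)) := by
  rw [pv_modify_eq_app]
  exact pvApp_app_self v0 d k G F

-- ---- reduction of port A's entry processing to pvRun form ----

-- the empty inner dict / the fresh [0, 0] cell, as the pvApp defaults
def pvED : IDict := PySem.Dict.empty
def pvC0 : List Int := [0, 0]

-- the net effect of A's statements for one player2 occurrence, on the inner dict
def pvIStep (g : List String) (p1 : String) (d : IDict) (p2 : String) : IDict :=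
  if p2 = p1 then d
  else
    let d2 := (d.setdefault p2 pvC0).modify p2 pvC0 pvBump0
    if p1 ∈ g then d2.modify p2 pvC0 pvBump1 else d2

theorem pvAStep_app (g : List String) (p1 : String) (st : SDict) (p2 : String) (F : IDict → IDict) :
    pvAStep g p1 (pvApp pvED st (p1, F)) p2
      = pvApp pvED st (p1, fun d => pvIStep g p1 (F d) p2) := by
  by_cases h : p2 = p1
  · simp [pvAStep, pvIStep, h]
  · simp only [pvAStep, pvIStep, h, if_false]
    show (if p1 ∈ g then _ else _) = _
    rw [show (PySem.Dict.empty : IDict) = pvED from rfl,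
        show ([0, 0] : List Int) = pvC0 from rfl]
    by_cases hg : p1 ∈ g <;>
      simp [hg, pv_modify_eq_app, pvApp_app_self]

theorem pvA_inner_fold (g : List String) (p1 : String) (l : List String) (F : IDict → IDict)
    (st : SDict) :
    l.foldl (pvAStep g p1) (pvApp pvED st (p1, F))
      = pvApp pvED st (p1, fun d => l.foldl (pvIStep g p1) (F d)) := by
  induction l generalizing F with
  | nil => rfl
  | cons p2 l ih =>
    simp only [List.foldl_cons]
    rw [pvAStep_app, ih]

theorem pvA_row (g : List String) (p1s : List String) (st : SDict) (hnd : st.keys.Nodup) :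
    p1s.foldl (fun st p1 => g.foldl (pvAStep g p1) (st.setdefault p1 PySem.Dict.empty)) st
      = pvRun pvED (p1s.map (fun p1 => (p1, fun d => g.foldl (pvIStep g p1) d))) st := by
  induction p1s generalizing st with
  | nil => rfl
  | cons p1 p1s ih =>
    simp only [List.foldl_cons, List.map_cons, pvRun, List.foldl_cons]
    rw [show st.setdefault p1 PySem.Dict.empty = pvApp pvED st (p1, id) from
          pv_sd_eq_app pvED st p1 hnd,
        pvA_inner_fold g p1 g id st]
    exact ih _ (pv_nodup_app _ _ _ hnd)

theorem pvA_entry_run (gs : List (List String)) (allP : List String) (st : SDict)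
    (hnd : st.keys.Nodup) :
    gs.foldl (fun st g =>
        allP.foldl (fun st p1 => g.foldl (pvAStep g p1) (st.setdefault p1 PySem.Dict.empty)) st) st
      = pvRun pvED (gs.flatMap (fun g => allP.map (fun p1 => (p1, fun d => g.foldl (pvIStep g p1) d)))) st := by
  induction gs generalizing st with
  | nil => rfl
  | cons g gs ih =>
    simp only [List.foldl_cons, List.flatMap_cons]
    rw [pvRun_append, pvA_row g allP st hnd]
    exact ih _ (pv_nodup_run _ _ _ hnd)


-- ---- reduction of port B's entry processing to pvRun form ----

theorem pvB_sd (ord : List String) (st : SDict) (hnd : st.keys.Nodup) :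
    ord.foldl (fun st p1 => st.setdefault p1 PySem.Dict.empty) st
      = pvRun pvED (ord.map (fun p1 => (p1, (id : IDict → IDict)))) st := by
  induction ord generalizing st with
  | nil => rfl
  | cons p1 ord ih =>
    simp only [List.foldl_cons, List.map_cons, pvRun, List.foldl_cons]
    rw [show st.setdefault p1 PySem.Dict.empty = pvApp pvED st (p1, id) from
          pv_sd_eq_app pvED st p1 hnd]
    exact ih _ (pv_nodup_app _ _ _ hnd)

theorem pvB_modify_loop (ord : List String) (Fb : String → IDict → IDict) (st : SDict) :
    ord.foldl (fun st p1 => st.modify p1 PySem.Dict.empty (Fb p1)) st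
      = pvRun pvED (ord.map (fun p1 => (p1, Fb p1))) st := by
  rw [pvRun_map]
  rfl

-- the inner-dict function B applies at key p1 of one entry
def pvBInF (groups : List (List String)) (occ : PySem.Dict String Int) (ord : List String)
    (p1 : String) (d : IDict) : IDict :=
  ord.foldl (fun d p2 =>
    if p2 = p1 then d
    else
      ((d.setdefault p2 pvC0).modify p2 pvC0 (pvAdd0 (occ.getD p2 0))).modify p2 pvC0
        (pvAdd1 ((pvEx groups p1).getD p2 0))) d

theorem pvBEntry_run (e : List (String × List String)) (st : SDict) (hnd : st.keys.Nodup) :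
    pvBEntry e st
      = pvRun pvED
          (((pvOcc (PySem.Dict.mk e).values).keys.map (fun p1 => (p1, (id : IDict → IDict))))
            ++ (pvOcc (PySem.Dict.mk e).values).keys.map (fun p1 =>
                  (p1, pvBInF (PySem.Dict.mk e).values (pvOcc (PySem.Dict.mk e).values)
                        (pvOcc (PySem.Dict.mk e).values).keys p1))) st := by
  rw [pvRun_append, ← pvB_sd _ st hnd, ← pvB_modify_loop]
  rfl

-- ---- key-set bookkeeping ----

theorem pv_update_self (s : List String) (xs : List String) (hsub : ∀ x ∈ xs, x ∈ s) :
    PySem.Set.update s xs = s := by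
  rw [PySem.Set.update_eq_append_filter]
  have hnil : List.filter (fun y => !PySem.Set.contains s y) (PySem.Set.ofList xs) = [] := by
    refine List.filter_eq_nil_iff.mpr ?_
    intro y hy
    have hmem : y ∈ s := hsub y ((PySem.Set.mem_ofList _ _).mp hy)
    have hc : PySem.Set.contains s y = true := (PySem.Set.contains_iff s y).mpr hmem
    simp [hc, hmem]
  rw [hnil, List.append_nil]

theorem pv_allP_eq (gs : List (List String)) :
    gs.foldl (fun s g => PySem.Set.union s g) PySem.Set.empty = PySem.Set.ofList gs.flatten := by
  have h : ∀ (s : PySem.Set String),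
      gs.foldl (fun s g => PySem.Set.union s g) s = PySem.Set.update s gs.flatten := by
    induction gs with
    | nil => intro s; rfl
    | cons g gs ih =>
      intro s
      simp only [List.foldl_cons, List.flatten_cons]
      rw [PySem.Set.update_append]
      exact ih _
  rw [h]
  rfl

theorem pv_ord_eq (gs : List (List String)) :
    (pvOcc gs).keys = PySem.Set.ofList gs.flatten := by
  have h : ∀ (d : PySem.Dict String Int),
      (gs.foldl (fun occ g => g.foldl (fun occ p => occ.insert p (occ.getD p 0 + 1)) occ) d).keys
        = PySem.Set.update d.keys gs.flatten := by
    induction gs with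
    | nil => intro d; rfl
    | cons g gs ih =>
      intro d
      simp only [List.foldl_cons, List.flatten_cons]
      rw [ih, PySem.Dict.keys_foldl_insert, PySem.Set.update_append]
  rw [pvOcc, h]
  rfl

theorem pv_ofList_flat_const (gs : List (List String)) (ks : List String) (hnd : ks.Nodup)
    (hne : gs ≠ []) : PySem.Set.ofList (gs.flatMap (fun _ => ks)) = ks := by
  obtain ⟨g, gs', rfl⟩ := List.exists_cons_of_ne_nil hne
  rw [List.flatMap_cons, PySem.Set.ofList_append, PySem.Set.ofList_eq_self_of_nodup _ hnd]
  exact pv_update_self ks _ (by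
    intro x hx
    obtain ⟨g', _, hg'⟩ := List.mem_flatMap.mp hx
    exact hg')

theorem pv_ofList_self_append (s : List String) (hnd : s.Nodup) :
    PySem.Set.ofList (s ++ s) = s := by
  rw [PySem.Set.ofList_append, PySem.Set.ofList_eq_self_of_nodup _ hnd]
  exact pv_update_self s s (fun x h => h)

theorem pv_filter_map_nodup {ν : Type} (l : List String) (Ffun : String → ν) (k : String)
    (hnd : l.Nodup) (hk : k ∈ l) :
    (l.map (fun x => (x, Ffun x))).filter (fun p => p.1 == k) = [(k, Ffun k)] := by
  induction l with
  | nil => cases hk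
  | cons x l ih =>
    obtain ⟨hx, hl⟩ := List.nodup_cons.mp hnd
    rcases List.mem_cons.mp hk with rfl | hk'
    · have hnil : (l.map (fun x => (x, Ffun x))).filter (fun p => p.1 == k) = [] := by
        refine List.filter_eq_nil_iff.mpr ?_
        rintro p hp
        obtain ⟨y, hy, rfl⟩ := List.mem_map.mp hp
        simp only [beq_iff_eq, decide_eq_true_eq]
        rintro rfl
        exact hx hy
      simp [hnil]
    · have hxk : (x == k) = false := by
        simp only [beq_eq_false_iff_ne]
        rintro rfl
        exact hx hk'
      simp only [List.map_cons, List.filter_cons, hxk]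
      exact ih hl hk'

theorem pv_filter_map_const {ν : Type} (l : List String) (f : ν) (k : String) :
    (l.map (fun x => (x, f))).filter (fun p => p.1 == k)
      = List.replicate (l.count k) (k, f) := by
  induction l with
  | nil => rfl
  | cons x l ih =>
    by_cases hx : x = k
    · subst hx
      simp [List.count_cons_self, List.replicate_succ, ih]
    · have hxk : (x == k) = false := by simp [hx]
      simp [List.filter_cons, hxk, List.count_cons_of_ne (by simpa using hx), ih]

theorem pv_ofList_filter (l : List String) (P : String → Bool) :
    PySem.Set.ofList (l.filter P) = (PySem.Set.ofList l).filter P := by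
  induction l using List.reverseRecOn with
  | nil => rfl
  | append_singleton l x ih =>
    rw [List.filter_append, PySem.Set.ofList_append_singleton]
    by_cases hP : P x
    · have hfx : List.filter P [x] = [x] := by simp [hP]
      rw [hfx, PySem.Set.ofList_append_singleton]
      by_cases hm : x ∈ PySem.Set.ofList l
      · rw [PySem.Set.add_of_mem hm,
            PySem.Set.add_of_mem (by rw [ih]; exact List.mem_filter.mpr ⟨hm, hP⟩), ih]
      · rw [PySem.Set.add_of_not_mem hm,
            PySem.Set.add_of_not_mem (by rw [ih]; exact fun hc => hm (List.mem_of_mem_filter hc)),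
            ih, List.filter_append]
        simp [hP]
    · have hfx : List.filter P [x] = [] := by simp [hP]
      rw [hfx, List.append_nil]
      by_cases hm : x ∈ PySem.Set.ofList l
      · rw [PySem.Set.add_of_mem hm, ih]
      · rw [PySem.Set.add_of_not_mem hm, List.filter_append, ih]
        simp [hP]

theorem pv_flatMap_filter (gs : List (List String)) (P : String → Bool) :
    gs.flatMap (fun g => g.filter P) = gs.flatten.filter P := by
  induction gs with
  | nil => rfl
  | cons g gs ih => simp [List.flatMap_cons, List.flatten_cons, List.filter_append, ih]


-- ---- arithmetic facts about the cell updates ----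

theorem pvAdd0_add0 (a b : Int) (c : List Int) : pvAdd0 a (pvAdd0 b c) = pvAdd0 (a + b) c := by
  cases c with
  | nil => rfl
  | cons x r => simp [pvAdd0]; ring

theorem pvAdd1_add1 (a b : Int) (c : List Int) : pvAdd1 a (pvAdd1 b c) = pvAdd1 (a + b) c := by
  cases c with
  | nil => rfl
  | cons x r =>
    cases r with
    | nil => rfl
    | cons y r => simp [pvAdd1]; ring

theorem pvAdd0_add1_comm (a b : Int) (c : List Int) :
    pvAdd0 a (pvAdd1 b c) = pvAdd1 b (pvAdd0 a c) := by
  cases c with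
  | nil => rfl
  | cons x r =>
    cases r with
    | nil => rfl
    | cons y r => simp [pvAdd0, pvAdd1]

theorem pvAdd0_zero (c : List Int) : pvAdd0 0 c = c := by
  cases c <;> simp [pvAdd0]

theorem pvAdd1_zero (c : List Int) : pvAdd1 0 c = c := by
  cases c with
  | nil => rfl
  | cons x r => cases r <;> simp [pvAdd1]

theorem pvBump0_eq (c : List Int) : pvBump0 c = pvAdd0 1 c := by
  cases c <;> rfl

theorem pvBump1_eq (c : List Int) : pvBump1 c = pvAdd1 1 c := by
  cases c with
  | nil => rfl
  | cons x r => cases r <;> rfl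

-- ---- the composed per-pair functions of both ports ----

-- A's net effect of one player2 occurrence in group g on the cell of (p1, p2)
def pvPhi (g : List String) (p1 : String) (c : List Int) : List Int :=
  if p1 ∈ g then pvBump1 (pvBump0 c) else pvBump0 c

theorem pvIStep_app (g : List String) (p1 : String) (d : IDict) (p2 : String) :
    pvIStep g p1 d p2 = if p2 = p1 then d else pvApp pvC0 d (p2, pvPhi g p1) := by
  by_cases h : p2 = p1
  · simp [pvIStep, h]
  · simp only [pvIStep, h, if_false]
    by_cases hg : p1 ∈ g
    · have hphi : pvPhi g p1 = fun x => pvBump1 (pvBump0 x) := by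
        funext c; simp [pvPhi, hg]
      simp [hg, pv_sd_modify, pv_app_modify, hphi]
    · have hphi : pvPhi g p1 = pvBump0 := by
        funext c; simp [pvPhi, hg]
      simp [hg, pv_sd_modify, pv_app_modify, hphi]

theorem pv_foldl_skip_run {ν : Type} (v0 : ν) (l : List String) (k : String)
    (Ffun : String → ν → ν) (d : PySem.Dict String ν) :
    l.foldl (fun d x => if x = k then d else pvApp v0 d (x, Ffun x)) d
      = pvRun v0 ((l.filter (fun x => !(x == k))).map (fun x => (x, Ffun x))) d := by
  rw [pvRun_map, List.foldl_filter]
  have hfn : (fun (d : PySem.Dict String ν) x =>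
        if (!(x == k)) = true then pvApp v0 d (x, Ffun x) else d)
      = (fun d x => if x = k then d else pvApp v0 d (x, Ffun x)) := by
    funext d x
    by_cases hx : x = k <;> simp [hx]
  rw [hfn]

theorem pvA_group_inner (g : List String) (k : String) (d : IDict) :
    g.foldl (pvIStep g k) d
      = pvRun pvC0 ((g.filter (fun x => !(x == k))).map (fun x => (x, pvPhi g k))) d := by
  rw [← pv_foldl_skip_run]
  have hfn : pvIStep g k = (fun d x => if x = k then d else pvApp pvC0 d (x, pvPhi g k)) := by
    funext d x
    exact pvIStep_app g k d x
  rw [hfn]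

theorem pv_foldl_run {α ν : Type} (v0 : ν) (gl : List α) (opsOf : α → List (String × (ν → ν)))
    (d : PySem.Dict String ν) :
    gl.foldl (fun d g => pvRun v0 (opsOf g) d) d = pvRun v0 (gl.flatMap opsOf) d := by
  induction gl generalizing d with
  | nil => rfl
  | cons g gl ih => rw [List.foldl_cons, List.flatMap_cons, pvRun_append, ih]

-- ---- the numeric values B reads from its occ / ex dicts ----

theorem pv_occ_getD (gs : List (List String)) (p : String) :
    (pvOcc gs).getD p 0 = (gs.map (fun g => (g.count p : Int))).sum := by
  have h : ∀ (d : PySem.Dict String Int),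
      (gs.foldl (fun occ g => g.foldl (fun occ x => occ.insert x (occ.getD x 0 + 1)) occ) d).getD p 0
        = d.getD p 0 + (gs.map (fun g => (g.count p : Int))).sum := by
    induction gs with
    | nil => intro d; simp
    | cons g gs ih =>
      intro d
      simp only [List.foldl_cons, List.map_cons, List.sum_cons]
      rw [ih, PySem.Dict.getD_foldl_insert_add_one]
      ring
  rw [pvOcc, h]
  simp [PySem.Dict.getD_empty]

theorem pv_ex_getD (gs : List (List String)) (k p : String) (hne : p ≠ k) :
    (pvEx gs k).getD p 0
      = (gs.map (fun g => if k ∈ g then (g.count p : Int) else 0)).sum := by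
  have hstep : ∀ (g : List String) (d : PySem.Dict String Int),
      (g.foldl (fun ex p2 => if p2 = k then ex else ex.insert p2 (ex.getD p2 0 + 1)) d).getD p 0
        = d.getD p 0 + (g.count p : Int) := by
    intro g d
    have hfn : (fun (ex : PySem.Dict String Int) p2 =>
          if p2 = k then ex else ex.insert p2 (ex.getD p2 0 + 1))
        = (fun ex p2 => if (!(p2 == k)) = true then ex.insert p2 (ex.getD p2 0 + 1) else ex) := by
      funext ex p2
      by_cases hp2 : p2 = k <;> simp [hp2]
    rw [hfn, ← List.foldl_filter, PySem.Dict.getD_foldl_insert_add_one]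
    congr 1
    rw [List.count_filter (by simp [hne])]
  have h : ∀ (d : PySem.Dict String Int),
      (gs.foldl (fun ex g =>
          if k ∈ g then
            g.foldl (fun ex p2 => if p2 = k then ex else ex.insert p2 (ex.getD p2 0 + 1)) ex
          else ex) d).getD p 0
        = d.getD p 0 + (gs.map (fun g => if k ∈ g then (g.count p : Int) else 0)).sum := by
    induction gs with
    | nil => intro d; simp
    | cons g gs ih =>
      intro d
      simp only [List.foldl_cons, List.map_cons, List.sum_cons]
      rw [ih]
      by_cases hg : k ∈ g
      · rw [if_pos hg, if_pos hg, hstep]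
        ring
      · rw [if_neg hg, if_neg hg]
        ring
  rw [pvEx, h]
  simp [PySem.Dict.getD_empty]

-- applying pvPhi n times is one batched pvAdd1/pvAdd0 update
theorem pv_rep_apply (g : List String) (k p2 : String) (n : Nat) (c : List Int) :
    (List.replicate n ((p2, pvPhi g k) : String × (List Int → List Int))).foldl
        (fun v p => p.2 v) c
      = pvAdd1 (if k ∈ g then (n : Int) else 0) (pvAdd0 (n : Int) c) := by
  induction n generalizing c with
  | zero => simp [pvAdd0_zero, pvAdd1_zero]
  | succ n ih =>
    rw [List.replicate_succ, List.foldl_cons, ih]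
    show pvAdd1 _ (pvAdd0 _ (pvPhi g k c)) = _
    by_cases hg : k ∈ g <;>
      simp [pvPhi, hg, pvBump0_eq, pvBump1_eq, pvAdd0_add1_comm, pvAdd0_add0, pvAdd1_add1,
        pvAdd1_zero] <;>
      constructor <;> push_cast <;> ring


-- ---- per-pair agreement of the collapsed operations ----

theorem pv_sum_apply (gs : List (List String)) (k p2 : String) (c : List Int) :
    gs.foldl (fun c g =>
        pvAdd1 (if k ∈ g then (g.count p2 : Int) else 0) (pvAdd0 (g.count p2 : Int) c)) c
      = pvAdd1 ((gs.map (fun g => if k ∈ g then (g.count p2 : Int) else 0)).sum)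
          (pvAdd0 ((gs.map (fun g => (g.count p2 : Int))).sum) c) := by
  induction gs generalizing c with
  | nil => simp [pvAdd0_zero, pvAdd1_zero]
  | cons g gs ih =>
    simp only [List.foldl_cons, List.map_cons, List.sum_cons]
    rw [ih, pvAdd0_add1_comm, pvAdd1_add1, pvAdd0_add0]
    congr 1
    · omega
    · congr 1
      omega

theorem pv_comp_flatMap (gs : List (List String)) (k p2 : String) (hne : p2 ≠ k) (c : List Int) :
    pvComp (gs.flatMap (fun g =>
        (g.filter (fun x => !(x == k))).map (fun x => (x, pvPhi g k)))) p2 c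
      = pvAdd1 ((pvEx gs k).getD p2 0) (pvAdd0 ((pvOcc gs).getD p2 0) c) := by
  rw [pv_occ_getD, pv_ex_getD gs k p2 hne, ← pv_sum_apply]
  induction gs generalizing c with
  | nil => rfl
  | cons g gs ih =>
    rw [List.flatMap_cons, pvComp_append, List.foldl_cons, ih]
    have hcnt : (g.filter (fun x => !(x == k))).count p2 = g.count p2 :=
      List.count_filter (by simp [hne])
    have hcomp : pvComp ((g.filter (fun x => !(x == k))).map (fun x => (x, pvPhi g k))) p2 c
        = pvAdd1 (if k ∈ g then (g.count p2 : Int) else 0) (pvAdd0 (g.count p2 : Int) c) := by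
      rw [pvComp, pv_filter_map_const, hcnt, pv_rep_apply]
    rw [hcomp]

theorem pv_comp_rows (gs : List (List String)) (ord : List String) (hnd : ord.Nodup)
    (k : String) (hk : k ∈ ord) (T : List String → String → IDict → IDict) (c : IDict) :
    pvComp (gs.flatMap (fun g => ord.map (fun p1 => (p1, T g p1)))) k c
      = gs.foldl (fun c g => T g k c) c := by
  induction gs generalizing c with
  | nil => rfl
  | cons g gs ih =>
    rw [List.flatMap_cons, pvComp_append, List.foldl_cons]
    have hhead : pvComp (ord.map (fun p1 => (p1, T g p1))) k c = T g k c := by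
      rw [pvComp, pv_filter_map_nodup _ _ _ hnd hk]
      rfl
    rw [hhead]
    exact ih _

-- ---- the heart: A's grouped inner loops equal B's batched inner loop ----

theorem pv_inner_eq (gs : List (List String)) (k : String) (d : IDict) :
    gs.foldl (fun d g => g.foldl (pvIStep g k) d) d
      = pvBInF gs (pvOcc gs) ((pvOcc gs).keys) k d := by
  have hordnd : ((pvOcc gs).keys).Nodup := by
    rw [pv_ord_eq]
    exact PySem.Set.nodup_ofList _
  have hA : gs.foldl (fun d g => g.foldl (pvIStep g k) d) d
      = pvRun pvC0 (gs.flatMap (fun g =>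
          (g.filter (fun x => !(x == k))).map (fun x => (x, pvPhi g k)))) d := by
    rw [← pv_foldl_run]
    have hfn : (fun (d : IDict) (g : List String) => g.foldl (pvIStep g k) d)
        = (fun (d : IDict) (g : List String) => pvRun pvC0
            ((g.filter (fun x => !(x == k))).map (fun x => (x, pvPhi g k))) d) := by
      funext d g
      exact pvA_group_inner g k d
    rw [hfn]
  have hB : pvBInF gs (pvOcc gs) ((pvOcc gs).keys) k d
      = pvRun pvC0 ((((pvOcc gs).keys).filter (fun x => !(x == k))).map
          (fun p2 => (p2, fun c => pvAdd1 ((pvEx gs k).getD p2 0)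
            (pvAdd0 ((pvOcc gs).getD p2 0) c)))) d := by
    rw [pvBInF, ← pv_foldl_skip_run]
    have hfn : (fun (d : IDict) p2 =>
          if p2 = k then d
          else ((d.setdefault p2 pvC0).modify p2 pvC0 (pvAdd0 ((pvOcc gs).getD p2 0))).modify p2
            pvC0 (pvAdd1 ((pvEx gs k).getD p2 0)))
        = (fun d p2 => if p2 = k then d
            else pvApp pvC0 d (p2, fun c => pvAdd1 ((pvEx gs k).getD p2 0)
              (pvAdd0 ((pvOcc gs).getD p2 0) c))) := by
      funext d p2
      by_cases hp2 : p2 = k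
      · simp [hp2]
      · simp [hp2, pv_sd_modify, pv_app_modify]
    rw [hfn]
  rw [hA, hB]
  rw [pvRun_collapse pvC0 (gs.flatMap (fun g =>
        (g.filter (fun x => !(x == k))).map (fun x => (x, pvPhi g k)))) d,
      pvRun_collapse pvC0 ((((pvOcc gs).keys).filter (fun x => !(x == k))).map
        (fun p2 => (p2, fun c => pvAdd1 ((pvEx gs k).getD p2 0)
          (pvAdd0 ((pvOcc gs).getD p2 0) c)))) d]
  have hkA : (gs.flatMap (fun g =>
        (g.filter (fun x => !(x == k))).map (fun x => (x, pvPhi g k)))).map Prod.fst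
      = gs.flatten.filter (fun x => !(x == k)) := by
    rw [List.map_flatMap, ← pv_flatMap_filter]
    simp [List.map_map, Function.comp_def]
  have hkB : ((((pvOcc gs).keys).filter (fun x => !(x == k))).map
        (fun p2 => (p2, fun c => pvAdd1 ((pvEx gs k).getD p2 0)
          (pvAdd0 ((pvOcc gs).getD p2 0) c)))).map Prod.fst
      = ((pvOcc gs).keys).filter (fun x => !(x == k)) := by
    simp [List.map_map, Function.comp_def]
  rw [hkA, hkB]
  have hsetA : PySem.Set.ofList (gs.flatten.filter (fun x => !(x == k)))
      = ((pvOcc gs).keys).filter (fun x => !(x == k)) := by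
    rw [pv_ofList_filter, ← pv_ord_eq]
  have hsetB : PySem.Set.ofList (((pvOcc gs).keys).filter (fun x => !(x == k)))
      = ((pvOcc gs).keys).filter (fun x => !(x == k)) :=
    PySem.Set.ofList_eq_self_of_nodup _ (hordnd.filter _)
  rw [hsetA, hsetB]
  apply pvRun_congr_map
  intro p2 hp2 c
  have hp2k : p2 ≠ k := by
    have := (List.mem_filter.mp hp2).2
    simpa using this
  have hp2nd : (((pvOcc gs).keys).filter (fun x => !(x == k))).Nodup := hordnd.filter _
  rw [pv_comp_flatMap gs k p2 hp2k c]
  have hB2 : pvComp ((((pvOcc gs).keys).filter (fun x => !(x == k))).map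
        (fun p2 => (p2, fun c => pvAdd1 ((pvEx gs k).getD p2 0)
          (pvAdd0 ((pvOcc gs).getD p2 0) c)))) p2 c
      = pvAdd1 ((pvEx gs k).getD p2 0) (pvAdd0 ((pvOcc gs).getD p2 0) c) := by
    rw [pvComp, pv_filter_map_nodup _ _ _ hp2nd hp2]
    rfl
  rw [hB2]

-- ---- per-entry equality and nodup preservation ----

theorem pv_entry_run' (st : SDict) (e : List (String × List String)) (hnd : st.keys.Nodup) :
    pvAEntry st e
      = pvRun pvED ((PySem.Dict.mk e).values.flatMap (fun g =>
          ((PySem.Dict.mk e).values.foldl (fun s g => PySem.Set.union s g) PySem.Set.empty).map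
            (fun p1 => (p1, fun d => g.foldl (pvIStep g p1) d)))) st := by
  have hA0 : pvAEntry st e
      = (PySem.Dict.mk e).values.foldl (fun st g =>
          ((PySem.Dict.mk e).values.foldl (fun s g => PySem.Set.union s g)
            PySem.Set.empty).foldl
            (fun st p1 => g.foldl (pvAStep g p1) (st.setdefault p1 PySem.Dict.empty)) st) st := rfl
  rw [hA0, pvA_entry_run _ _ _ hnd]

theorem pv_entry_nodup (st : SDict) (e : List (String × List String)) (hnd : st.keys.Nodup) :
    (pvAEntry st e).keys.Nodup := by
  rw [pv_entry_run' st e hnd]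
  exact pv_nodup_run _ _ _ hnd

theorem pv_entry_eq (st : SDict) (e : List (String × List String)) (hnd : st.keys.Nodup) :
    pvAEntry st e = pvBEntry e st := by
  rw [pv_entry_run' st e hnd, pvBEntry_run e st hnd]
  have hordnd : ((pvOcc (PySem.Dict.mk e).values).keys).Nodup := by
    rw [pv_ord_eq]
    exact PySem.Set.nodup_ofList _
  rw [show (PySem.Dict.mk e).values.foldl (fun s g => PySem.Set.union s g) PySem.Set.empty
        = (pvOcc (PySem.Dict.mk e).values).keys by rw [pv_allP_eq, pv_ord_eq]]
  rw [pvRun_collapse pvED _ st, pvRun_collapse pvED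
        ((((pvOcc (PySem.Dict.mk e).values).keys).map (fun p1 => (p1, (id : IDict → IDict))))
          ++ ((pvOcc (PySem.Dict.mk e).values).keys).map (fun p1 =>
            (p1, pvBInF (PySem.Dict.mk e).values (pvOcc (PySem.Dict.mk e).values)
              (pvOcc (PySem.Dict.mk e).values).keys p1))) st]
  have hkA : ((PySem.Dict.mk e).values.flatMap (fun g =>
        ((pvOcc (PySem.Dict.mk e).values).keys).map
          (fun p1 => (p1, fun d => g.foldl (pvIStep g p1) d)))).map Prod.fst
      = (PySem.Dict.mk e).values.flatMap (fun _ => (pvOcc (PySem.Dict.mk e).values).keys) := by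
    simp [List.map_flatMap, List.map_map, Function.comp_def]
  have hkB : ((((pvOcc (PySem.Dict.mk e).values).keys).map
          (fun p1 => (p1, (id : IDict → IDict))))
        ++ ((pvOcc (PySem.Dict.mk e).values).keys).map (fun p1 =>
            (p1, pvBInF (PySem.Dict.mk e).values (pvOcc (PySem.Dict.mk e).values)
              (pvOcc (PySem.Dict.mk e).values).keys p1))).map Prod.fst
      = (pvOcc (PySem.Dict.mk e).values).keys ++ (pvOcc (PySem.Dict.mk e).values).keys := by
    simp [List.map_map, Function.comp_def]
  rw [hkA, hkB]
  have hsetA : PySem.Set.ofList ((PySem.Dict.mk e).values.flatMap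
        (fun _ => (pvOcc (PySem.Dict.mk e).values).keys))
      = (pvOcc (PySem.Dict.mk e).values).keys := by
    by_cases hgs : (PySem.Dict.mk e).values = []
    · rw [hgs]
      have h0 : pvOcc ([] : List (List String)) = PySem.Dict.empty := rfl
      simp [h0]
    · exact pv_ofList_flat_const _ _ hordnd hgs
  have hsetB : PySem.Set.ofList ((pvOcc (PySem.Dict.mk e).values).keys
        ++ (pvOcc (PySem.Dict.mk e).values).keys)
      = (pvOcc (PySem.Dict.mk e).values).keys :=
    pv_ofList_self_append _ hordnd
  rw [hsetA, hsetB]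
  apply pvRun_congr_map
  intro k hk c
  rw [pv_comp_rows _ _ hordnd k hk]
  rw [pvComp_append]
  have hidc : ∀ (c : IDict),
      pvComp (((pvOcc (PySem.Dict.mk e).values).keys).map
        (fun p1 => (p1, (id : IDict → IDict)))) k c = c := by
    intro c
    rw [pvComp, pv_filter_map_nodup _ _ _ hordnd hk]
    rfl
  have hinc : ∀ (c : IDict),
      pvComp (((pvOcc (PySem.Dict.mk e).values).keys).map (fun p1 =>
        (p1, pvBInF (PySem.Dict.mk e).values (pvOcc (PySem.Dict.mk e).values)
          (pvOcc (PySem.Dict.mk e).values).keys p1))) k c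
      = pvBInF (PySem.Dict.mk e).values (pvOcc (PySem.Dict.mk e).values)
          (pvOcc (PySem.Dict.mk e).values).keys k c := by
    intro c
    rw [pvComp, pv_filter_map_nodup _ _ _ hordnd hk]
    rfl
  rw [hidc, hinc]
  exact pv_inner_eq _ k c

-- ---- the popping while-loop equals a reversed fold over the dropped tail ----

theorem pv_loop_eq (mem : List (List (String × List String))) (st : SDict) (turn : Int)
    (ht : 0 ≤ turn) (hnd : st.keys.Nodup) :
    pvALoop mem st turn = ((mem.drop turn.toNat).reverse).foldl (fun st e => pvBEntry e st) st := by
  induction mem using List.reverseRecOn generalizing st with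
  | nil =>
    rw [pvALoop]
    have hc : ¬ ((([] : List (List (String × List String))).length : Int) > turn) := by
      simp
      omega
    rw [if_neg hc]
    simp
  | append_singleton xs x ih =>
    rw [pvALoop]
    by_cases hlen : (((xs ++ [x]).length : Int) > turn)
    · rw [if_pos hlen]
      split
      · next heq => simp at heq
      · next e heq =>
        have hex : x = e := by
          rw [List.getLast?_concat] at heq
          exact Option.some.inj heq
        subst hex
        rw [List.dropLast_concat]
        rw [ih (pvAEntry st x) (pv_entry_nodup st x hnd), pv_entry_eq st x hnd]
        have h1 : turn.toNat ≤ xs.length := by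
          simp [List.length_append] at hlen
          omega
        have hdrop : (xs ++ [x]).drop turn.toNat = xs.drop turn.toNat ++ [x] :=
          List.drop_append_of_le_length h1
        rw [hdrop]
        simp [List.reverse_append]
    · rw [if_neg hlen]
      have hdrop : (xs ++ [x]).drop turn.toNat = [] := by
        refine List.drop_eq_nil_iff.mpr ?_
        simp [List.length_append] at hlen ⊢
        omega
      rw [hdrop]
      rfl

-- ===== VERDICT (by name: the statement is the Claim_ definition above) =====
theorem clear_memory_spec : Claim_equal_clear_memory := by
  intro memory storage turn _ hpre
  obtain ⟨ht, hnd, -, -, -⟩ := hpre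
  show clear_memory memory storage turn = clear_memory_alt memory storage turn
  have hndSD : (pvToSD storage).keys.Nodup := by
    unfold pvToSD
    simpa [List.map_map, Function.comp_def] using hnd
  have hmax : max turn 0 = turn := max_eq_left ht
  have halt : clear_memory_alt memory storage turn
      = pvFromSD (((memory.drop turn.toNat).reverse).foldl (fun st e => pvBEntry e st)
          (pvToSD storage)) := by
    have h0 : clear_memory_alt memory storage turn
        = pvFromSD (((PySem.List.slice memory (some (max turn 0)) none).reverse).foldl
            (fun st e => pvBEntry e st) (pvToSD storage)) := rfl
    rw [h0, PySem.List.slice_from memory (le_max_right turn 0), hmax]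
  rw [halt]
  unfold clear_memory
  rw [pv_loop_eq memory (pvToSD storage) turn ht hndSD]
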